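-- pv_equiv track=rewrite | github.com/ZekangZhao/IBI1_2023-24 | resit code portifolio/Practical9/duplicate idetifier.py | identify_duplicates
-- ===== SOURCE A (Python) =====
-- def identify_duplicates(gene_names):
--     unique_genes = []
--     duplicate_genes = []
--     gene_count = {}
--
--     for gene in gene_names:
--         if gene in gene_count:
--             gene_count[gene] += 1
--         else:
--             gene_count[gene] = 1
--
--     for gene, count in gene_count.items():
--         if count == 1:
--             unique_genes.append(gene)
--         else:
--             duplicate_genes.append(gene)
--
--     return unique_genes, duplicate_genes
-- ===== SOURCE B (Python) =====
-- def identify_duplicates(gene_names):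
--     xs = list(gene_names)
--     unique_genes = []
--     duplicate_genes = []
--     while xs:
--         x = xs[0]
--         rest = xs[1:]
--         if x in rest:
--             duplicate_genes.append(x)
--             xs = [y for y in rest if y != x]
--         else:
--             unique_genes.append(x)
--             xs = rest
--     return unique_genes, duplicate_genes
-- ===== Notes on version B (the rewrite author's own statement) =====
-- stated objective: alternative
-- what changed: Replaces count-dict-then-partition with a shrinking-worklist elimination: repeatedly classify the first element by whether it recurs in the remainder and delete its other occurrences, with no counting structure at all.
import Mathlib
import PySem

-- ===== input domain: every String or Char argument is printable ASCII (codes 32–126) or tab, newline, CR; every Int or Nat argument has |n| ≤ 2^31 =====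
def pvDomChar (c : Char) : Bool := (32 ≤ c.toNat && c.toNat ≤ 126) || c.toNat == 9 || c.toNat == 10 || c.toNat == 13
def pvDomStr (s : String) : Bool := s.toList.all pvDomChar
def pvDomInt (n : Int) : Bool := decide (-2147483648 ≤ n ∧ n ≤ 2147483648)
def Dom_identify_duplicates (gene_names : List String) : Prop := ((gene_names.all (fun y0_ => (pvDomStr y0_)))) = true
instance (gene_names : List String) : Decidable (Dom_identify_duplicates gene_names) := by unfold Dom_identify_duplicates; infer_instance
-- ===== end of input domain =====

-- B replaces A's count-dict-then-partition with a shrinking-worklist elimination: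
-- classify the first element by whether it recurs in the remainder, delete its other
-- occurrences, repeat; no counting structure at all (objective: alternative).

-- ===== PORT A =====
def identify_duplicates (gene_names : List String) : List String × List String :=
  let gene_count : PySem.Dict String Int :=
    gene_names.foldl
      (fun d gene =>
        if d.contains gene then d.insert gene (d.getD gene 0 + 1) else d.insert gene 1)
      PySem.Dict.empty
  let res :=
    gene_count.items.foldl
      (fun (acc : List String × List String) p =>
        if p.2 == 1 then (acc.1 ++ [p.1], acc.2) else (acc.1, acc.2 ++ [p.1]))
      ([], [])
  res

-- ===== PORT B =====
-- the while loop of Source B: state (xs, unique_genes, duplicate_genes), xs strictly shrinks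
def identifyDupGo (xs u d : List String) : List String × List String :=
  match xs with
  | [] => (u, d)
  | x :: rest =>
    if rest.contains x then
      identifyDupGo (rest.filter (fun y => !(y == x))) u (d ++ [x])
    else
      identifyDupGo rest (u ++ [x]) d
termination_by xs.length
decreasing_by
  · simp only [List.length_unattach, List.length_cons]
    exact Nat.lt_succ_of_le (le_trans (List.length_filter_le _ _) (by simp))
  · simp

def identify_duplicates_alt (gene_names : List String) : List String × List String :=
  identifyDupGo gene_names [] []

-- ===== PRECONDITION & SPEC =====
def Spec_identify_duplicates (gene_names : List String) (out : List String × List String) : Prop := out = identify_duplicates_alt gene_names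
instance (gene_names : List String) (out : List String × List String) : Decidable (Spec_identify_duplicates gene_names out) := by unfold Spec_identify_duplicates; infer_instance

-- ===== CLAIM (what is proved, stated in full; the proofs are below) =====
def Claim_equal_identify_duplicates : Prop := ∀ (gene_names : List String), Dom_identify_duplicates gene_names → Spec_identify_duplicates gene_names (identify_duplicates gene_names)

-- ===== LEMMAS AND PROOFS =====

-- unfolding equations for identifyDupGo (hides the attach/unattach of WF recursion)
theorem identifyDupGo_nil (u d : List String) : identifyDupGo [] u d = (u, d) := by
  simp [identifyDupGo]

theorem identifyDupGo_cons (x : String) (rest u d : List String) :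
    identifyDupGo (x :: rest) u d =
      if rest.contains x then
        identifyDupGo (rest.filter (fun y => !(y == x))) u (d ++ [x])
      else identifyDupGo rest (u ++ [x]) d := by
  rw [identifyDupGo]

-- A's dict-building loop is Counter(gene_names).
theorem pvA_count_eq_counter (xs : List String) :
    xs.foldl
      (fun d gene =>
        if d.contains gene then d.insert gene (d.getD gene 0 + 1) else d.insert gene 1)
      PySem.Dict.empty = PySem.Dict.counter xs := by
  have hstep :
      (fun (d : PySem.Dict String Int) gene =>
        if d.contains gene then d.insert gene (d.getD gene 0 + 1) else d.insert gene 1)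
      = fun d gene => d.insert gene (d.getD gene 0 + 1) := by
    funext d gene
    by_cases h : d.contains gene = true
    · simp [h]
    · simp only [Bool.not_eq_true] at h
      simp [h, PySem.Dict.getD_of_not_contains d 0 h]
  rw [hstep, PySem.Dict.foldl_insert_getD_add_one_eq_counter]

-- A's second loop partitions a list of (key, count) pairs.
theorem pvA_partition_fold (l : List (String × Int)) (u d : List String) :
    l.foldl
      (fun (acc : List String × List String) p =>
        if p.2 == 1 then (acc.1 ++ [p.1], acc.2) else (acc.1, acc.2 ++ [p.1]))
      (u, d)
    = (u ++ (l.filter (fun p => p.2 == 1)).map (fun p => p.1),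
       d ++ (l.filter (fun p => !(p.2 == 1))).map (fun p => p.1)) := by
  induction l generalizing u d with
  | nil => simp
  | cons p l ih =>
    rw [List.foldl_cons]
    by_cases h : (p.2 == 1) = true
    · rw [if_pos h, ih]
      simp [h]
    · rw [if_neg h, ih]
      simp [h]

theorem pv_ofList_cons (x : String) (xs : List String) :
    PySem.Set.ofList (x :: xs)
      = x :: (PySem.Set.ofList xs).filter (fun y => !(y == x)) := by
  show PySem.Set.update (PySem.Set.add PySem.Set.empty x) xs = _
  have h1 : PySem.Set.add PySem.Set.empty x = [x] := by
    simp [PySem.Set.add, PySem.Set.empty, PySem.Set.contains]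
  rw [h1, PySem.Set.update_eq_append_filter]
  simp only [List.singleton_append, List.cons.injEq, true_and]
  apply List.filter_congr
  intro y _
  rw [PySem.Set.contains_eq_decide]
  by_cases h : y = x
  · subst h; simp
  · simp [h]

-- set(xs) commutes with filtering (first-occurrence dedup keeps relative order)
theorem pv_ofList_filter (p : String → Bool) (xs : List String) :
    PySem.Set.ofList (xs.filter p) = (PySem.Set.ofList xs).filter p := by
  induction xs with
  | nil => rfl
  | cons x xs ih =>
    rw [pv_ofList_cons, List.filter_cons]
    by_cases hp : p x = true
    · rw [if_pos hp, pv_ofList_cons, ih, List.filter_cons_of_pos hp,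
        List.filter_filter, List.filter_filter]
      congr 1
      apply List.filter_congr
      intro y _
      rw [Bool.and_comm]
    · rw [if_neg hp, ih, List.filter_cons_of_neg hp, List.filter_filter]
      apply List.filter_congr
      intro y _
      by_cases hy : y = x
      · subst hy
        simp [hp]
      · simp [hy]

-- counting survives filtering out a different element
theorem pv_count_filter_ne (x g : String) (xs : List String) (h : g ≠ x) :
    (xs.filter (fun y => !(y == x))).count g = xs.count g := by
  induction xs with
  | nil => rfl
  | cons y ys ih =>
    rw [List.filter_cons]
    by_cases hy : y = x
    · subst hy
      rw [if_neg (by simp), ih]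
      simp [Ne.symm h]
    · rw [if_pos (by simp [hy])]
      simp [List.count_cons, ih]

-- closed form of B's worklist loop
theorem pvB_go_closed (n : Nat) :
    ∀ (xs u d : List String), xs.length ≤ n →
      identifyDupGo xs u d =
        (u ++ (PySem.Set.ofList xs).filter (fun g => xs.count g == 1),
         d ++ (PySem.Set.ofList xs).filter (fun g => !(xs.count g == 1))) := by
  induction n with
  | zero =>
    intro xs u d hlen
    have : xs = [] := List.length_eq_zero_iff.mp (Nat.le_zero.mp hlen)
    subst this
    simp [identifyDupGo_nil]
  | succ n ih =>
    intro xs u d hlen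
    match xs with
    | [] => simp [identifyDupGo_nil]
    | x :: rest =>
      have hr : rest.length ≤ n := by simpa using hlen
      rw [identifyDupGo_cons]
      by_cases hc : rest.contains x = true
      · rw [if_pos hc]
        have hmem : x ∈ rest := by simpa using hc
        have hcnt : 1 ≤ rest.count x := List.count_pos_iff.mpr hmem
        have hflen : (rest.filter (fun y => !(y == x))).length ≤ n :=
          le_trans (List.length_filter_le _ _) hr
        rw [ih _ u (d ++ [x]) hflen, pv_ofList_cons, pv_ofList_filter]
        have hxc : ((x :: rest).count x == 1) = false := by
          simp only [List.count_cons_self, beq_eq_false_iff_ne]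
          omega
        rw [List.filter_cons_of_neg (by simp only [hxc]; simp),
          List.filter_cons_of_pos (by simp only [hxc, Bool.not_false])]
        refine Prod.ext ?_ ?_
        · show u ++ _ = u ++ _
          congr 1
          apply List.filter_congr
          intro g hg
          have hgx : g ≠ x := by
            have := (List.mem_filter.mp hg).2
            simpa using this
          rw [pv_count_filter_ne x g rest hgx]
          have : (x :: rest).count g = rest.count g := by
            simp [Ne.symm hgx]
          rw [this]
        · show d ++ [x] ++ _ = d ++ (x :: _)
          rw [List.append_assoc]
          congr 1
          rw [List.singleton_append]
          congr 1
          apply List.filter_congr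
          intro g hg
          have hgx : g ≠ x := by
            have := (List.mem_filter.mp hg).2
            simpa using this
          rw [pv_count_filter_ne x g rest hgx]
          have : (x :: rest).count g = rest.count g := by
            simp [Ne.symm hgx]
          rw [this]
      · rw [if_neg hc]
        have hmem : x ∉ rest := by simpa using hc
        rw [ih rest (u ++ [x]) d hr, pv_ofList_cons]
        have hfid : (PySem.Set.ofList rest).filter (fun y => !(y == x))
            = PySem.Set.ofList rest := by
          apply List.filter_eq_self.mpr
          intro y hy
          have : y ∈ rest := (PySem.Set.mem_ofList rest y).mp hy
          have : y ≠ x := fun h => hmem (h ▸ this)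
          simp [this]
        rw [hfid]
        have hxc : ((x :: rest).count x == 1) = true := by
          have : rest.count x = 0 := List.count_eq_zero.mpr hmem
          simp [List.count_cons_self, this]
        rw [List.filter_cons_of_pos (by simp only [hxc]),
          List.filter_cons_of_neg (by simp only [hxc, Bool.not_true]; simp)]
        refine Prod.ext ?_ ?_
        · show u ++ [x] ++ _ = u ++ (x :: _)
          rw [List.append_assoc]
          congr 1
          rw [List.singleton_append]
          congr 1
          apply List.filter_congr
          intro g hg
          have hgr : g ∈ rest := (PySem.Set.mem_ofList rest g).mp hg
          have hgx : g ≠ x := fun h => hmem (h ▸ hgr)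
          simp [Ne.symm hgx]
        · show d ++ _ = d ++ _
          congr 1
          apply List.filter_congr
          intro g hg
          have hgr : g ∈ rest := (PySem.Set.mem_ofList rest g).mp hg
          have hgx : g ≠ x := fun h => hmem (h ▸ hgr)
          simp [Ne.symm hgx]

-- ===== VERDICT (by name: the statement is the Claim_ definition above) =====
theorem identify_duplicates_spec : Claim_equal_identify_duplicates := by
  intro xs _
  show identify_duplicates xs = identify_duplicates_alt xs
  unfold identify_duplicates identify_duplicates_alt
  rw [pvB_go_closed xs.length xs [] [] (le_refl _)]
  simp only [pvA_count_eq_counter, PySem.Dict.items_counter, pvA_partition_fold,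
    List.nil_append]
  rw [List.filter_map, List.filter_map, List.map_map, List.map_map]
  have hid : ((fun (p : String × Int) => p.1) ∘ fun k => (k, (xs.count k : Int)))
      = id := rfl
  rw [hid, List.map_id, List.map_id]
  have hcast : ∀ n : Nat, (((n : Int)) == (1 : Int)) = (n == 1) := by
    intro n
    by_cases h : n = 1
    · simp [h]
    · have h' : (n : Int) ≠ 1 := by exact_mod_cast h
      simp [h, h']
  refine Prod.ext ?_ ?_
  · show List.filter _ _ = List.filter _ _
    apply List.filter_congr
    intro g _
    simp only [Function.comp_apply]
    exact hcast (xs.count g)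
  · show List.filter _ _ = List.filter _ _
    apply List.filter_congr
    intro g _
    simp only [Function.comp_apply]
    rw [hcast (xs.count g)]
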